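-- pv_equiv track=rewrite | github.com/KarinaJadia/Other-Projects | wip_chem_eq_balancer.py | lr_splitter
-- ===== SOURCE A (Python) =====
-- def lr_splitter(eq):
--     ''' splits the equation into left and right '''
--     d = {'left': [], 'right': []}
--     eq = eq.split()
--
--     flag = 'left'
--     for i in eq:
--         if i == '=':
--             flag = 'right'
--         elif i == '+':
--             pass
--         elif flag == 'left':
--             d['left'].append(i)
--         else:
--             d['right'].append(i)
--
--     return d
-- ===== SOURCE B (Python) =====
-- def lr_splitter(eq):
--     ''' splits the equation into left and right '''
--     tokens = eq.split()
--     if '=' in tokens: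
--         idx = tokens.index('=')
--     else:
--         idx = len(tokens)
--     left = tokens[:idx]
--     right = tokens[idx + 1:]
--     return {'left': [t for t in left if t != '+'],
--             'right': [t for t in right if t != '+' and t != '=']}
-- ===== Notes on version B (the rewrite author's own statement) =====
-- stated objective: alternative
-- what changed: Replaces the flag-threading single pass with find-the-first-'=' boundary, slice into left/right halves, and two filtered comprehensions.
import Mathlib
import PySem

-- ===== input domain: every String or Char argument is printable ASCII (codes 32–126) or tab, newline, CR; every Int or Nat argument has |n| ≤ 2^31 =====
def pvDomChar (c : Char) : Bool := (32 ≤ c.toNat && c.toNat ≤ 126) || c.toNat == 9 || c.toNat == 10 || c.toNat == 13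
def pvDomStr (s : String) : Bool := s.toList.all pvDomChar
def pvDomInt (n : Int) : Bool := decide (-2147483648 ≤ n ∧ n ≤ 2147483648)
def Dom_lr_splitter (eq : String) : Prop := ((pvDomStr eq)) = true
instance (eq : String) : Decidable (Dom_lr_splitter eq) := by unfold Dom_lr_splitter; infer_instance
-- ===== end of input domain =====

-- B replaces A's flag-threading single pass by locating the first '=' token and slicing
-- into two filtered halves (alternative decomposition, same cost).

-- ===== PORT A =====
-- A's dict has the two fixed keys 'left'/'right' created up front and only ever appended to;
-- it is carried as the two list components of the fold state and rebuilt as the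
-- insertion-ordered association list [("left", …), ("right", …)] at the end.
def lrStepA (st : String × List String × List String) (i : String) :
    String × List String × List String :=
  if i = "=" then ("right", st.2.1, st.2.2)
  else if i = "+" then st
  else if st.1 = "left" then (st.1, st.2.1 ++ [i], st.2.2)
  else (st.1, st.2.1, st.2.2 ++ [i])

def lr_splitter (eq : String) : List (String × List String) :=
  let toks := PySem.Str.split₀ eq
  let st := toks.foldl lrStepA ("left", [], [])
  [("left", st.2.1), ("right", st.2.2)]

-- ===== PORT B =====
def lr_splitter_alt (eq : String) : List (String × List String) :=
  let tokens := PySem.Str.split₀ eq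
  let idx : Nat :=
    match PySem.List.index? tokens "=" with
    | some k => k
    | none => tokens.length
  let left := PySem.List.slice tokens none (some (idx : Int))
  let right := PySem.List.slice tokens (some ((idx : Int) + 1)) none
  [("left", left.filter (fun t => t != "+")),
   ("right", right.filter (fun t => t != "+" && t != "="))]

-- ===== PRECONDITION & SPEC =====
def Spec_lr_splitter (eq : String) (out : List (String × List String)) : Prop := out = lr_splitter_alt eq
instance (eq : String) (out : List (String × List String)) : Decidable (Spec_lr_splitter eq out) := by unfold Spec_lr_splitter; infer_instance

-- ===== CLAIM (what is proved, stated in full; the proofs are below) =====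
def Claim_equal_lr_splitter : Prop := ∀ (eq : String), Dom_lr_splitter eq → Spec_lr_splitter eq (lr_splitter eq)

-- ===== LEMMAS AND PROOFS =====

lemma lr_fold_right (ts : List String) (l r : List String) :
    ts.foldl lrStepA ("right", l, r) =
      ("right", l, r ++ ts.filter (fun t => t != "+" && t != "=")) := by
  induction ts generalizing r with
  | nil => simp
  | cons t ts ih =>
    by_cases h1 : t = "="
    · subst h1; simp [lrStepA, ih]
    · by_cases h2 : t = "+"
      · subst h2; simp [lrStepA, ih]
      · simp [lrStepA, h1, h2, ih]

lemma lr_fold_left (ts : List String) (l r : List String) :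
    ts.foldl lrStepA ("left", l, r) =
      match PySem.List.index? ts "=" with
      | none => ("left", l ++ ts.filter (fun t => t != "+"), r)
      | some k => ("right", l ++ ((ts.take k).filter (fun t => t != "+")),
                   r ++ ((ts.drop (k + 1)).filter (fun t => t != "+" && t != "="))) := by
  induction ts generalizing l with
  | nil => simp [PySem.List.index?]
  | cons t ts ih =>
    by_cases h1 : t = "="
    · subst h1
      rw [PySem.List.index?_cons_self]
      simp [lrStepA, lr_fold_right]
    · rw [PySem.List.index?_cons_of_ne ts h1]
      by_cases h2 : t = "+"
      · subst h2
        have := ih l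
        cases hix : List.idxOf? "=" ts with
        | none => simp [lrStepA, hix] at this ⊢; simp [this]
        | some k => simp [lrStepA, hix] at this ⊢; simp [this]
      · have := ih (l ++ [t])
        cases hix : List.idxOf? "=" ts with
        | none => simp [lrStepA, h1, h2, hix] at this ⊢; simp [this]
        | some k => simp [lrStepA, h1, h2, hix] at this ⊢; simp [this]

-- ===== VERDICT (by name: the statement is the Claim_ definition above) =====
theorem lr_splitter_spec : Claim_equal_lr_splitter := by
  intro eq _
  show lr_splitter eq = lr_splitter_alt eq
  unfold lr_splitter lr_splitter_alt
  dsimp only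
  rw [lr_fold_left]
  cases hix : PySem.List.index? (PySem.Str.split₀ eq) "=" with
  | none =>
    rw [PySem.List.slice_to_natCast, List.take_length,
        show (((PySem.Str.split₀ eq).length : Int) + 1)
            = (((PySem.Str.split₀ eq).length + 1 : Nat) : Int) by push_cast; ring,
        PySem.List.slice_from_natCast]
    simp [List.drop_eq_nil_of_le]
  | some k =>
    rw [PySem.List.slice_to_natCast,
        show ((k : Int) + 1) = ((k + 1 : Nat) : Int) by push_cast; ring,
        PySem.List.slice_from_natCast]
    simp
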